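-- pv_equiv track=rewrite | github.com/juanDeVicente/TextMiningUTAD | twitter_api/src/twitter_api.py | create_words_and_tweets_matrix
-- ===== SOURCE A (Python) =====
-- def create_words_and_tweets_matrix(tweets, words):
-- 	matrix = []
-- 	aux_tweet_list = []
-- 	for key, timesUsed in words:
-- 		for tweet in tweets:
-- 			aux_lowercase_tweet = tweet.lower()
--
-- 			if key in aux_lowercase_tweet:
-- 				aux_tweet_list.append(tweet)
-- 		matrix.append([key, timesUsed, aux_tweet_list])
-- 		aux_tweet_list = []
--
-- 	return matrix
-- ===== SOURCE B (Python) =====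
-- def create_words_and_tweets_matrix(tweets, words):
--     entries = list(words)
--     accs = [[] for _ in entries]
--     for tweet in tweets:
--         low = tweet.lower()
--         accs = [acc + [tweet] if key in low else acc
--                 for (key, _), acc in zip(entries, accs)]
--     return [[key, timesUsed, acc]
--             for (key, timesUsed), acc in zip(entries, accs)]
-- ===== Notes on version B (the rewrite author's own statement) =====
-- stated objective: alternative
-- what changed: Inverted the loop nesting: B makes a single outer pass over tweets, lowercasing each tweet once and appending it to positional per-word accumulators, then zips words with their accumulators; A loops over words outermost and re-lowercases every tweet for every word.
import Mathlib
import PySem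

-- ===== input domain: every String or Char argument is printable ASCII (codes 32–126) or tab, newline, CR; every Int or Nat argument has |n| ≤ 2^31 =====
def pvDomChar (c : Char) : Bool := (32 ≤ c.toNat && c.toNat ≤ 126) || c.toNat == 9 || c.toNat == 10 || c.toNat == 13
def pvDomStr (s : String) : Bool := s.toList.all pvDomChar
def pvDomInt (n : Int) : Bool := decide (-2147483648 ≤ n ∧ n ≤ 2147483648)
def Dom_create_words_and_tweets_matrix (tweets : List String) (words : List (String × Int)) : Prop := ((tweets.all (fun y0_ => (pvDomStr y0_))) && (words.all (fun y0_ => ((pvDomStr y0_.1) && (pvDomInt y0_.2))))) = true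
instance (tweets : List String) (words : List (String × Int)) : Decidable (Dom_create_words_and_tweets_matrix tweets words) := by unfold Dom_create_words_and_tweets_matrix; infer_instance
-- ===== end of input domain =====

-- B inverts the loop nesting: one outer pass over tweets maintaining positional per-word
-- accumulators, lowercasing each tweet once (objective: alternative decomposition).
-- ===== PORT A =====
def create_words_and_tweets_matrix (tweets : List String) (words : List (String × Int)) : List (String × Int × List String) :=
  -- matrix = [], aux_tweet_list = []; for key, timesUsed in words: for tweet in tweets: ...
  (words.foldl (fun (st : List (String × Int × List String) × List String) kv =>
      let aux := tweets.foldl (fun acc tweet =>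
          let low := PySem.Str.lower tweet
          if PySem.Str.isIn kv.1 low then acc ++ [tweet] else acc) st.2
      (st.1 ++ [(kv.1, kv.2, aux)], [])) ([], [])).1

-- ===== PORT B =====
def create_words_and_tweets_matrix_alt (tweets : List String) (words : List (String × Int)) : List (String × Int × List String) :=
  let entries := words
  let accs := tweets.foldl (fun (accs : List (List String)) tweet =>
      let low := PySem.Str.lower tweet
      (entries.zip accs).map (fun p => if PySem.Str.isIn p.1.1 low then p.2 ++ [tweet] else p.2))
    (entries.map (fun _ => []))
  (entries.zip accs).map (fun p => (p.1.1, p.1.2, p.2))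

-- ===== PRECONDITION & SPEC =====
def Spec_create_words_and_tweets_matrix (tweets : List String) (words : List (String × Int)) (out : List (String × Int × List String)) : Prop := out = create_words_and_tweets_matrix_alt tweets words
instance (tweets : List String) (words : List (String × Int)) (out : List (String × Int × List String)) : Decidable (Spec_create_words_and_tweets_matrix tweets words out) := by unfold Spec_create_words_and_tweets_matrix; infer_instance

-- ===== CLAIM (what is proved, stated in full; the proofs are below) =====
def Claim_equal_create_words_and_tweets_matrix : Prop := ∀ (tweets : List String) (words : List (String × Int)), Dom_create_words_and_tweets_matrix tweets words → Spec_create_words_and_tweets_matrix tweets words (create_words_and_tweets_matrix tweets words)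

-- ===== LEMMAS AND PROOFS =====

-- the common value both ports compute
def pvRow (tweets : List String) (kv : String × Int) : String × Int × List String :=
  (kv.1, kv.2, tweets.filter (fun t => PySem.Str.isIn kv.1 (PySem.Str.lower t)))

-- A's outer loop appends one row per word; aux_tweet_list is reset to [] each round
theorem portA_eq (tweets : List String) (words : List (String × Int)) :
    create_words_and_tweets_matrix tweets words = words.map (pvRow tweets) := by
  unfold create_words_and_tweets_matrix
  suffices h : ∀ (ws : List (String × Int)) (m : List (String × Int × List String)),
      (ws.foldl (fun (st : List (String × Int × List String) × List String) kv =>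
        let aux := tweets.foldl (fun acc tweet =>
            let low := PySem.Str.lower tweet
            if PySem.Str.isIn kv.1 low then acc ++ [tweet] else acc) st.2
        (st.1 ++ [(kv.1, kv.2, aux)], [])) (m, [])).1 = m ++ ws.map (pvRow tweets) by
    simpa using h words []
  intro ws
  induction ws with
  | nil => intro m; simp
  | cons kv rest ih =>
    intro m
    simp only [List.foldl_cons, List.map_cons]
    rw [ih]
    simp [pvRow, PySem.List.foldl_append_if_eq_filter]

-- mapping over a list zipped with a function of itself is mapping over the list
theorem map_zip_map {α β γ : Type} (l : List α) (f : α → β) (h : α × β → γ) :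
    (l.zip (l.map f)).map h = l.map (fun a => h (a, f a)) := by
  induction l with
  | nil => rfl
  | cons a as ih => simp [ih]

-- B's tweet loop: parallel accumulators end up holding each word's filtered tweet list
theorem altLoop (tweets : List String) (words : List (String × Int))
    (g : String × Int → List String) :
    tweets.foldl (fun (accs : List (List String)) tweet =>
        let low := PySem.Str.lower tweet
        (words.zip accs).map (fun p => if PySem.Str.isIn p.1.1 low then p.2 ++ [tweet] else p.2))
      (words.map g) =
    words.map (fun kv => g kv ++ tweets.filter (fun t => PySem.Str.isIn kv.1 (PySem.Str.lower t))) := by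
  induction tweets generalizing g with
  | nil => simp
  | cons t ts ih =>
    simp only [List.foldl_cons]
    rw [map_zip_map words (fun kv => g kv)
          (fun p => if PySem.Str.isIn p.1.1 (PySem.Str.lower t) then p.2 ++ [t] else p.2),
        ih (fun kv => if PySem.Str.isIn kv.1 (PySem.Str.lower t) then g kv ++ [t] else g kv)]
    apply List.map_congr_left
    intro kv _
    rw [List.filter_cons]
    split_ifs <;> simp

theorem portB_eq (tweets : List String) (words : List (String × Int)) :
    create_words_and_tweets_matrix_alt tweets words = words.map (pvRow tweets) := by
  show (words.zip (tweets.foldl (fun (accs : List (List String)) tweet =>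
      let low := PySem.Str.lower tweet
      (words.zip accs).map (fun p => if PySem.Str.isIn p.1.1 low then p.2 ++ [tweet] else p.2))
    (words.map (fun _ => [])))).map (fun p => (p.1.1, p.1.2, p.2)) = _
  rw [altLoop tweets words (fun _ => []),
    map_zip_map words
      (fun kv => [] ++ tweets.filter (fun t => PySem.Str.isIn kv.1 (PySem.Str.lower t)))
      (fun p => (p.1.1, p.1.2, p.2))]
  simp [pvRow]

-- ===== VERDICT (by name: the statement is the Claim_ definition above) =====
theorem create_words_and_tweets_matrix_spec : Claim_equal_create_words_and_tweets_matrix := by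
  intro tweets words _
  unfold Spec_create_words_and_tweets_matrix
  rw [portA_eq, portB_eq]
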